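-- pv_equiv track=rewrite | github.com/TomasLoha/MutantesPy | mutantes.py | is_mutant
-- ===== SOURCE A (Python) =====
-- def is_mutant(dna):
--     cont = 0
--
--     for i in range(len(dna)):
--         for j in range(len(dna[0])):
--             # Verificar filas
--             if j + 3 < len(dna[0]) and dna[i][j] == dna[i][j + 1] == dna[i][j + 2] == dna[i][j + 3]:
--                 cont += 1
--                 if cont > 1:
--                     return True
--
--             # Verificar columnas
--             if i + 3 < len(dna) and dna[i][j] == dna[i + 1][j] == dna[i + 2][j] == dna[i + 3][j]:
--                 cont += 1
--                 if cont > 1: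
--                     return True
--
--             # Verificar diagonales descendentes
--             if i + 3 < len(dna) and j + 3 < len(dna[0]) and dna[i][j] == dna[i + 1][j + 1] == dna[i + 2][j + 2] == dna[i + 3][j + 3]:
--                 cont += 1
--                 if cont > 1:
--                     return True
--
--             # Verificar diagonales ascendentes
--             if i - 3 >= 0 and j + 3 < len(dna[0]) and dna[i][j] == dna[i - 1][j + 1] == dna[i - 2][j + 2] == dna[i - 3][j + 3]:
--                 cont += 1
--                 if cont > 1:
--                     return True
--
--     return False
-- ===== SOURCE B (Python) =====
-- def _lines(dna):
--     n = len(dna)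
--     m = len(dna[0]) if dna else 0
--     lines = [[dna[i][j] for j in range(m)] for i in range(n)]
--     lines += [[dna[i][j] for i in range(n)] for j in range(m)]
--     lines += [[dna[i][i + s] for i in range(n) if 0 <= i + s < m]
--               for s in range(-(n - 1), m)]
--     lines += [[dna[i][s - i] for i in range(n) if 0 <= s - i < m]
--               for s in range(n + m - 1)]
--     return lines
--
--
-- def is_mutant(dna):
--     total = 0
--     for line in _lines(dna):
--         prev = None
--         run = 0
--         for ch in line:
--             run = run + 1 if ch == prev else 1
--             if run >= 4:
--                 total += 1
--             prev = ch
--     return total > 1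
-- ===== Notes on version B (the rewrite author's own statement) =====
-- stated objective: alternative
-- what changed: A scans the grid cell-by-cell testing four direction windows per cell with an early-exit counter; B instead extracts the four families of lines (rows, columns, descending and ascending diagonals) and does one run-length scan per line, counting every position where the current equal-run reaches length >= 4, returning whether the global count exceeds 1.
-- outside the precondition, e.g. on is_mutant(['AB', 'A']): A returns False, B raises IndexError
import Mathlib
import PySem

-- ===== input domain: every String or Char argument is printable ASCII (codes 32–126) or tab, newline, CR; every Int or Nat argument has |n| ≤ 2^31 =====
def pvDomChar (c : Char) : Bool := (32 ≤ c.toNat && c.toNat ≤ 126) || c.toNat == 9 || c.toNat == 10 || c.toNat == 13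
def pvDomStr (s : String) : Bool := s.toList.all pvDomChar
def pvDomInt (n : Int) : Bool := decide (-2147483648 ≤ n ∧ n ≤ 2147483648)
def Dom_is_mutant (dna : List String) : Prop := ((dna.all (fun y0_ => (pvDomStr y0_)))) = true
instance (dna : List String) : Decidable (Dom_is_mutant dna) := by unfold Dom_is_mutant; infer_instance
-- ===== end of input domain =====

-- B replaces A's per-cell four-direction window test (with early exit) by extracting row/column/diagonal
-- lines and run-length scanning each line once; objective: alternative decomposition, same exact result.

-- ===== PORT A =====
-- grid helpers (shared by both ports: plain element access; indices are in range under Pre_, where getD never takes its default)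
def pvM (dna : List String) : Nat := (dna.headD "").toList.length
def pvG (dna : List String) (i j : Nat) : Char := ((dna.getD i "").toList).getD j ' '

-- the four chained comparisons of A, with their guards (Python's `a == b == c == d` is the conjunction)
def rowHitA (dna : List String) (i j : Nat) : Bool :=
  decide (j + 3 < pvM dna ∧ pvG dna i j = pvG dna i (j+1) ∧ pvG dna i (j+1) = pvG dna i (j+2) ∧ pvG dna i (j+2) = pvG dna i (j+3))
def colHitA (dna : List String) (i j : Nat) : Bool :=
  decide (i + 3 < dna.length ∧ pvG dna i j = pvG dna (i+1) j ∧ pvG dna (i+1) j = pvG dna (i+2) j ∧ pvG dna (i+2) j = pvG dna (i+3) j)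
def dgHitA (dna : List String) (i j : Nat) : Bool :=
  decide (i + 3 < dna.length ∧ j + 3 < pvM dna ∧ pvG dna i j = pvG dna (i+1) (j+1) ∧ pvG dna (i+1) (j+1) = pvG dna (i+2) (j+2) ∧ pvG dna (i+2) (j+2) = pvG dna (i+3) (j+3))
def upHitA (dna : List String) (i j : Nat) : Bool :=
  decide (3 ≤ i ∧ j + 3 < pvM dna ∧ pvG dna i j = pvG dna (i-1) (j+1) ∧ pvG dna (i-1) (j+1) = pvG dna (i-2) (j+2) ∧ pvG dna (i-2) (j+2) = pvG dna (i-3) (j+3))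

-- `if <hit>: cont += 1; if cont > 1: return True`  (none = early `return True`)
def pvCheck (hit : Bool) (cont : Int) : Option Int :=
  if hit then (if cont + 1 > 1 then none else some (cont + 1)) else some cont

def stepA (r c d u : Bool) (cont : Int) : Option Int :=
  (pvCheck r cont).bind fun c1 => (pvCheck c c1).bind fun c2 => (pvCheck d c2).bind fun c3 => pvCheck u c3

def innerA (dna : List String) (i : Nat) : List Nat → Int → Option Int
  | [], cont => some cont
  | j :: js, cont =>
      (stepA (rowHitA dna i j) (colHitA dna i j) (dgHitA dna i j) (upHitA dna i j) cont).bind (innerA dna i js)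

def outerA (dna : List String) : List Nat → Int → Option Int
  | [], cont => some cont
  | i :: is, cont => (innerA dna i (List.range (pvM dna)) cont).bind (outerA dna is)

def is_mutant (dna : List String) : Bool := (outerA dna (List.range dna.length) 0).isNone

-- ===== PORT B =====
-- all lines of the grid: rows, columns, descending diagonals (j - i = t - (n-1)), ascending diagonals (i + j = s)
def linesB (dna : List String) : List (List Char) :=
  let n := dna.length
  let m := pvM dna
  (List.range n).map (fun (i : Nat) => (List.range m).map (fun j => pvG dna i j))
  ++ (List.range m).map (fun j => (List.range n).map (fun i => pvG dna i j))
  ++ (List.range (n - 1 + m)).map (fun (t : Nat) =>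
        (List.range n).filterMap (fun (i : Nat) =>
          if 0 ≤ (i : Int) + ((t : Int) - ((n : Int) - 1)) ∧ (i : Int) + ((t : Int) - ((n : Int) - 1)) < (m : Int)
          then some (pvG dna i ((i : Int) + ((t : Int) - ((n : Int) - 1))).toNat) else none))
  ++ (List.range (n + m - 1)).map (fun (s : Nat) =>
        (List.range n).filterMap (fun (i : Nat) =>
          if 0 ≤ (s : Int) - (i : Int) ∧ (s : Int) - (i : Int) < (m : Int)
          then some (pvG dna i ((s : Int) - (i : Int)).toNat) else none))

-- the inner run-length loop of Source B: prev, run, total threaded exactly as in the Python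
def scanB : List Char → Option Char → Nat → Nat → Nat
  | [], _, _, total => total
  | ch :: rest, prev, run, total =>
      let run' := if some ch == prev then run + 1 else 1
      let total' := if 4 ≤ run' then total + 1 else total
      scanB rest (some ch) run' total'

def is_mutant_alt (dna : List String) : Bool :=
  decide (1 < (linesB dna).foldl (fun t line => scanB line none 0 t) 0)

-- ===== PRECONDITION & SPEC =====
-- Pre_ excludes grids with a row shorter than the first row: both programs index every row up to
-- len(dna[0]), so there A may raise IndexError (or return by luck of its guards) while B's line
-- extraction raises; rows longer than the first are allowed (both programs ignore the excess).
def Pre_is_mutant (dna : List String) : Prop := ∀ s ∈ dna, (dna.headD "").toList.length ≤ s.toList.length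
instance (dna : List String) : Decidable (Pre_is_mutant dna) := by unfold Pre_is_mutant; infer_instance

def pvWitness_is_mutant : List String := ["ACGT", "AGGT", "ACGA", "TCGT"]

def Spec_is_mutant (dna : List String) (out : Bool) : Prop := out = is_mutant_alt dna
instance (dna : List String) (out : Bool) : Decidable (Spec_is_mutant dna out) := by unfold Spec_is_mutant; infer_instance

-- ===== CLAIM (what is proved, stated in full; the proofs are below) =====
def Claim_equal_is_mutant : Prop := ∀ (dna : List String), Dom_is_mutant dna → Pre_is_mutant dna → Spec_is_mutant dna (is_mutant dna)

-- ===== LEMMAS AND PROOFS =====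

def B2N (b : Bool) : Nat := cond b 1 0

def cellA (dna : List String) (i j : Nat) : Nat :=
  B2N (rowHitA dna i j) + B2N (colHitA dna i j) + B2N (dgHitA dna i j) + B2N (upHitA dna i j)

def countA (dna : List String) : Nat :=
  ∑ i ∈ Finset.range dna.length, ∑ j ∈ Finset.range (pvM dna), cellA dna i j

lemma stepA_eq (r c d u : Bool) (cont : Int) (h0 : 0 ≤ cont) (h1 : cont ≤ 1) :
    stepA r c d u cont =
      if 1 < cont + ((B2N r + B2N c + B2N d + B2N u : Nat) : Int) then none
      else some (cont + ((B2N r + B2N c + B2N d + B2N u : Nat) : Int)) := by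
  have h : cont = 0 ∨ cont = 1 := by omega
  rcases h with h | h <;> subst h <;>
    cases r <;> cases c <;> cases d <;> cases u <;> decide


lemma innerA_eq (dna : List String) (i : Nat) (js : List Nat) :
    ∀ (cont : Int), 0 ≤ cont → cont ≤ 1 →
    innerA dna i js cont =
      if 1 < cont + ((js.map (cellA dna i)).sum : Int) then none
      else some (cont + ((js.map (cellA dna i)).sum : Int)) := by
  induction js with
  | nil => intro cont h0 h1; simp [innerA]; omega
  | cons j js ih =>
    intro cont h0 h1
    have hs : stepA (rowHitA dna i j) (colHitA dna i j) (dgHitA dna i j) (upHitA dna i j) cont =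
        if 1 < cont + (cellA dna i j : Int) then none else some (cont + (cellA dna i j : Int)) :=
      stepA_eq _ _ _ _ cont h0 h1
    simp only [innerA, hs, List.map_cons, List.sum_cons]
    by_cases hgt : 1 < cont + (cellA dna i j : Int)
    · rw [if_pos hgt, if_pos (by omega)]
      rfl
    · rw [if_neg hgt]
      simp only [Option.bind_some]
      rw [ih (cont + (cellA dna i j : Int)) (by positivity) (by omega)]
      have h2 : cont + (cellA dna i j : Int) + ((js.map (cellA dna i)).sum : Int)
           = cont + ((cellA dna i j + (js.map (cellA dna i)).sum : Nat) : Int) := by push_cast; ring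
      rw [h2]

lemma outerA_eq (dna : List String) (il : List Nat) :
    ∀ (cont : Int), 0 ≤ cont → cont ≤ 1 →
    outerA dna il cont =
      if 1 < cont + ((il.map (fun i => ((List.range (pvM dna)).map (cellA dna i)).sum)).sum : Int) then none
      else some (cont + ((il.map (fun i => ((List.range (pvM dna)).map (cellA dna i)).sum)).sum : Int)) := by
  induction il with
  | nil => intro cont h0 h1; simp [outerA]; omega
  | cons i il ih =>
    intro cont h0 h1
    simp only [outerA, List.map_cons, List.sum_cons]
    rw [innerA_eq dna i _ cont h0 h1]
    by_cases hgt : 1 < cont + (((List.range (pvM dna)).map (cellA dna i)).sum : Int)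
    · rw [if_pos hgt, if_pos (by omega)]
      rfl
    · rw [if_neg hgt]
      simp only [Option.bind_some]
      rw [ih _ (by positivity) (by omega)]
      have h2 : cont + (((List.range (pvM dna)).map (cellA dna i)).sum : Int)
              + ((il.map (fun i => ((List.range (pvM dna)).map (cellA dna i)).sum)).sum : Int)
           = cont + ((((List.range (pvM dna)).map (cellA dna i)).sum
              + (il.map (fun i => ((List.range (pvM dna)).map (cellA dna i)).sum)).sum : Nat) : Int) := by
        push_cast; ring
      rw [h2]

lemma is_mutant_eq (dna : List String) : is_mutant dna = decide (1 < countA dna) := by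
  have h := outerA_eq dna (List.range dna.length) 0 le_rfl zero_le_one
  have hc : countA dna = ((List.range dna.length).map (fun i => ((List.range (pvM dna)).map (cellA dna i)).sum)).sum := by
    rfl
  rw [is_mutant, h, hc]
  by_cases hgt : 1 < (((List.range dna.length).map (fun i => ((List.range (pvM dna)).map (cellA dna i)).sum)).sum : Int)
  · rw [if_pos (by omega)]; simp; omega
  · rw [if_neg (by omega)]; simp; omega

def wc : List Char → Nat
  | a :: b :: c :: d :: t => (if a = b ∧ b = c ∧ c = d then 1 else 0) + wc (b :: c :: d :: t)
  | _ => 0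

lemma wc_short (l : List Char) (h : l.length ≤ 3) : wc l = 0 := by
  match l with
  | [] => rfl
  | [_] => rfl
  | [_, _] => rfl
  | [_, _, _] => rfl
  | _ :: _ :: _ :: _ :: _ => simp only [List.length_cons] at h; omega

lemma wc_pad (p c : Char) (cs : List Char) (h : c ≠ p) (k : Nat) (hk : k ≤ 3) :
    wc (List.replicate k p ++ c :: cs) = wc (c :: cs) := by
  have hpc : ¬ (p = c) := fun hh => h hh.symm
  interval_cases k
  · rfl
  · match cs with
    | [] => rfl
    | [e] => rfl
    | e :: f :: cs => simp [wc, hpc]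
  · match cs with
    | [] => rfl
    | [e] => simp [wc, hpc]
    | e :: f :: cs => simp [wc, hpc]
  · match cs with
    | [] => simp [wc, hpc]
    | [e] => simp [wc, hpc]
    | e :: f :: cs => simp [wc, hpc]

lemma scanB_some (cs : List Char) :
    ∀ (p : Char) (r t : Nat), 1 ≤ r →
    scanB cs (some p) r t = t + wc (List.replicate (min r 3) p ++ cs) := by
  induction cs with
  | nil =>
    intro p r t hr
    rw [scanB, wc_short _ (by simp)]; omega
  | cons ch rest ih =>
    intro p r t hr
    simp only [scanB]
    by_cases hc : ch = p
    · subst hc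
      simp only [beq_self_eq_true, if_true]
      by_cases h3 : 3 ≤ r
      · have hm : min r 3 = 3 := by omega
        rw [if_pos (show 4 ≤ r + 1 by omega), ih ch (r+1) (t+1) (by omega), hm,
            show min (r + 1) 3 = 3 by omega]
        have e1 : List.replicate 3 ch ++ ch :: rest = ch :: ch :: ch :: ch :: rest := rfl
        have e2 : List.replicate 3 ch ++ rest = ch :: ch :: ch :: rest := rfl
        rw [e1, e2, wc, if_pos ⟨rfl, rfl, rfl⟩]
        omega
      · have hm : min r 3 = r := by omega
        rw [if_neg (show ¬ 4 ≤ r + 1 by omega), ih ch (r+1) t (by omega), hm,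
            show min (r + 1) 3 = r + 1 by omega, List.replicate_succ', List.append_assoc]
        rfl
    · have hbeq : (some ch == some p) = false := by simp [hc]
      rw [hbeq]
      simp only [Bool.false_eq_true, if_false]
      rw [if_neg (show ¬ 4 ≤ 1 by omega), ih ch 1 t le_rfl,
          show min 1 3 = 1 from rfl, List.replicate_one, List.singleton_append,
          wc_pad p ch rest hc (min r 3) (min_le_right r 3)]

lemma scanB_none (l : List Char) (t : Nat) : scanB l none 0 t = t + wc l := by
  match l with
  | [] => simp [scanB, wc]
  | c :: rest =>
    simp only [scanB, show (some c == (none : Option Char)) = false from rfl,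
      Bool.false_eq_true, if_false]
    rw [if_neg (show ¬ 4 ≤ 1 by omega), scanB_some rest c 1 t le_rfl,
        show min 1 3 = 1 from rfl, List.replicate_one, List.singleton_append]

lemma foldl_scan (ls : List (List Char)) : ∀ (t : Nat),
    ls.foldl (fun t l => scanB l none 0 t) t = t + (ls.map wc).sum := by
  induction ls with
  | nil => intro t; simp
  | cons l ls ih =>
    intro t
    rw [List.foldl_cons, scanB_none l t, ih (t + wc l), List.map_cons, List.sum_cons]
    omega

def windInd (l : List Char) (p : Nat) : Nat :=
  if p + 3 < l.length ∧ l.getD p ' ' = l.getD (p+1) ' ' ∧ l.getD (p+1) ' ' = l.getD (p+2) ' '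
      ∧ l.getD (p+2) ' ' = l.getD (p+3) ' ' then 1 else 0

lemma windInd_cons (a : Char) (l : List Char) (p : Nat) : windInd (a :: l) (p + 1) = windInd l p := by
  simp only [windInd, List.length_cons, List.getD_cons_succ,
    show p + 1 + 1 = (p + 1) + 1 from rfl, show p + 1 + 2 = (p + 2) + 1 by omega,
    show p + 1 + 3 = (p + 3) + 1 by omega, List.getD_cons_succ]
  exact if_congr (and_congr_left' (by omega)) rfl rfl

lemma wc_cons (a : Char) (rest : List Char) : wc (a :: rest) = windInd (a :: rest) 0 + wc rest := by
  match rest with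
  | [] => simp [wc, windInd]
  | [b] => simp [wc, windInd]
  | [b, c] => simp [wc, windInd]
  | b :: c :: d :: t =>
    rw [show wc (a :: b :: c :: d :: t) = (if a = b ∧ b = c ∧ c = d then 1 else 0) + wc (b :: c :: d :: t) from rfl]
    congr 1
    simp only [windInd, List.length_cons, List.getD_cons_zero, List.getD_cons_succ]
    split_ifs with h1 h2 h3
    · rfl
    · exact absurd ⟨by omega, h1⟩ h2
    · exact absurd h3.2 h1
    · rfl

lemma wc_eq_sum (l : List Char) : wc l = ∑ p ∈ Finset.range l.length, windInd l p := by
  induction l with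
  | nil => simp [wc]
  | cons a rest ih =>
    rw [List.length_cons, Finset.sum_range_succ', wc_cons, ih, add_comm]
    congr 1
    exact Finset.sum_congr rfl (fun p _ => (windInd_cons a rest p).symm)

lemma filterMap_range_if {α : Type} (N a b : Nat) (f : Nat → α) (g : Nat → Option α)
    (hg : ∀ i, i < N → g i = if a ≤ i ∧ i < b then some (f i) else none)
    (hab : a ≤ b) (hbN : b ≤ N) :
    (List.range N).filterMap g = (List.range (b - a)).map (fun p => f (a + p)) := by
  have hsplit : List.range N = List.range' 0 a ++ List.range' a (b - a) ++ List.range' b (N - b) := by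
    rw [List.range_eq_range']
    have e1 : List.range' 0 a ++ List.range' a (b - a) = List.range' 0 b := by
      have := @List.range'_append 0 a (b - a) 1
      simpa [show a + (b - a) = b by omega] using this
    rw [List.append_assoc, ← List.append_assoc, e1]
    have := @List.range'_append 0 b (N - b) 1
    simpa [show b + (N - b) = N by omega] using this.symm
  rw [hsplit, List.filterMap_append, List.filterMap_append]
  have h1 : (List.range' 0 a).filterMap g = [] := by
    rw [List.filterMap_eq_nil_iff]
    intro x hx
    rw [List.mem_range'_1] at hx
    rw [hg x (by omega), if_neg (by omega)]
  have h3 : (List.range' b (N - b)).filterMap g = [] := by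
    rw [List.filterMap_eq_nil_iff]
    intro x hx
    rw [List.mem_range'_1] at hx
    rw [hg x (by omega), if_neg (by omega)]
  have h2 : (List.range' a (b - a)).filterMap g = (List.range (b - a)).map (fun p => f (a + p)) := by
    rw [List.filterMap_congr (g := fun x => some (f x)) ?_]
    · rw [List.filterMap_eq_map_iff_forall_eq_some.mpr (fun x hx => rfl), List.range'_eq_map_range,
        List.map_map]
      rfl
    · intro x hx
      rw [List.mem_range'_1] at hx
      rw [hg x (by omega), if_pos (by omega)]
  rw [h1, h2, h3, List.nil_append, List.append_nil]

lemma sum_bij2 (T n m : Nat) (len : Nat → Nat) (F : Nat → Nat → Nat) (G : Nat → Nat → Nat)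
    (fi fj : Nat → Nat → Nat) (gt gp : Nat → Nat → Nat)
    (h1 : ∀ t p, t < T → p < len t →
      fi t p < n ∧ fj t p < m ∧ gt (fi t p) (fj t p) = t ∧ gp (fi t p) (fj t p) = p ∧ F t p = G (fi t p) (fj t p))
    (h2 : ∀ i j, i < n → j < m →
      gt i j < T ∧ gp i j < len (gt i j) ∧ fi (gt i j) (gp i j) = i ∧ fj (gt i j) (gp i j) = j) :
    ∑ t ∈ Finset.range T, ∑ p ∈ Finset.range (len t), F t p
      = ∑ i ∈ Finset.range n, ∑ j ∈ Finset.range m, G i j := by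
  rw [← Finset.sum_sigma (Finset.range T) (fun t => Finset.range (len t)) (fun x => F x.1 x.2),
      ← Finset.sum_sigma (Finset.range n) (fun _ => Finset.range m) (fun x => G x.1 x.2)]
  refine Finset.sum_nbij' (fun x => ⟨fi x.1 x.2, fj x.1 x.2⟩) (fun x => ⟨gt x.1 x.2, gp x.1 x.2⟩)
    ?_ ?_ ?_ ?_ ?_
  · rintro ⟨t, p⟩ hx
    rw [Finset.mem_sigma, Finset.mem_range, Finset.mem_range] at *
    obtain ⟨ht, hp⟩ := hx
    obtain ⟨c1, c2, _⟩ := h1 t p ht hp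
    exact ⟨c1, c2⟩
  · rintro ⟨i, j⟩ hx
    rw [Finset.mem_sigma, Finset.mem_range, Finset.mem_range] at *
    obtain ⟨hi, hj⟩ := hx
    obtain ⟨c1, c2, _⟩ := h2 i j hi hj
    exact ⟨c1, c2⟩
  · rintro ⟨t, p⟩ hx
    rw [Finset.mem_sigma, Finset.mem_range, Finset.mem_range] at hx
    obtain ⟨c1, c2, c3, c4, _⟩ := h1 t p hx.1 hx.2
    simp only [Sigma.mk.injEq]
    exact ⟨c3, heq_of_eq c4⟩
  · rintro ⟨i, j⟩ hx
    rw [Finset.mem_sigma, Finset.mem_range, Finset.mem_range] at hx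
    obtain ⟨c1, c2, c3, c4⟩ := h2 i j hx.1 hx.2
    simp only [Sigma.mk.injEq]
    exact ⟨c3, heq_of_eq c4⟩
  · rintro ⟨t, p⟩ hx
    rw [Finset.mem_sigma, Finset.mem_range, Finset.mem_range] at hx
    obtain ⟨_, _, _, _, c5⟩ := h1 t p hx.1 hx.2
    exact c5

lemma B2N_decide (P : Prop) [Decidable P] : B2N (decide P) = if P then 1 else 0 := by
  by_cases h : P <;> simp [B2N, h]

lemma getD_map_range (n k : Nat) (f : Nat → Char) (h : k < n) (d : Char) :
    (((List.range n).map f).getD k d) = f k := by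
  rw [List.getD_eq_getElem _ d (by simpa using h)]
  simp

lemma windInd_map_range (L : Nat) (f : Nat → Char) (p : Nat) :
    windInd ((List.range L).map f) p =
      if p + 3 < L ∧ f p = f (p+1) ∧ f (p+1) = f (p+2) ∧ f (p+2) = f (p+3) then 1 else 0 := by
  have hlen : ((List.range L).map f).length = L := by simp
  by_cases h : p + 3 < L
  · unfold windInd
    rw [getD_map_range L p f (by omega) ' ', getD_map_range L (p+1) f (by omega) ' ',
        getD_map_range L (p+2) f (by omega) ' ', getD_map_range L (p+3) f (by omega) ' ']
    exact if_congr (and_congr_left' (by omega)) rfl rfl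
  · rw [windInd, if_neg (by rw [hlen]; tauto), if_neg (by tauto)]

def rowL (dna : List String) (i : Nat) : List Char :=
  (List.range (pvM dna)).map (fun j => pvG dna i j)

def colL (dna : List String) (j : Nat) : List Char :=
  (List.range dna.length).map (fun i => pvG dna i j)

def dscL (dna : List String) (t : Nat) : List Char :=
  (List.range dna.length).filterMap (fun (i : Nat) =>
    if 0 ≤ (i : Int) + ((t : Int) - ((dna.length : Int) - 1)) ∧ (i : Int) + ((t : Int) - ((dna.length : Int) - 1)) < (pvM dna : Int)
    then some (pvG dna i ((i : Int) + ((t : Int) - ((dna.length : Int) - 1))).toNat) else none)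

def ascL (dna : List String) (s : Nat) : List Char :=
  (List.range dna.length).filterMap (fun (i : Nat) =>
    if 0 ≤ (s : Int) - (i : Int) ∧ (s : Int) - (i : Int) < (pvM dna : Int)
    then some (pvG dna i ((s : Int) - (i : Int)).toNat) else none)

lemma linesB_eq (dna : List String) :
    linesB dna = (List.range dna.length).map (rowL dna)
      ++ (List.range (pvM dna)).map (colL dna)
      ++ (List.range (dna.length - 1 + pvM dna)).map (dscL dna)
      ++ (List.range (dna.length + pvM dna - 1)).map (ascL dna) := by
  unfold linesB rowL colL dscL ascL
  rfl

lemma countB_eq (dna : List String) :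
    ((linesB dna).map wc).sum =
      (∑ i ∈ Finset.range dna.length, wc (rowL dna i))
      + (∑ j ∈ Finset.range (pvM dna), wc (colL dna j))
      + (∑ t ∈ Finset.range (dna.length - 1 + pvM dna), wc (dscL dna t))
      + (∑ s ∈ Finset.range (dna.length + pvM dna - 1), wc (ascL dna s)) := by
  rw [linesB_eq]
  simp only [List.map_append, List.sum_append, List.map_map]
  rfl

lemma rows_part (dna : List String) :
    ∑ i ∈ Finset.range dna.length, wc (rowL dna i)
      = ∑ i ∈ Finset.range dna.length, ∑ j ∈ Finset.range (pvM dna), B2N (rowHitA dna i j) := by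
  refine Finset.sum_congr rfl (fun i _ => ?_)
  rw [rowL, wc_eq_sum, List.length_map, List.length_range]
  refine Finset.sum_congr rfl (fun j _ => ?_)
  rw [windInd_map_range, rowHitA, B2N_decide]

lemma cols_part (dna : List String) :
    ∑ j ∈ Finset.range (pvM dna), wc (colL dna j)
      = ∑ i ∈ Finset.range dna.length, ∑ j ∈ Finset.range (pvM dna), B2N (colHitA dna i j) := by
  have h : ∀ j, wc (colL dna j) = ∑ i ∈ Finset.range dna.length, B2N (colHitA dna i j) := by
    intro j
    rw [colL, wc_eq_sum, List.length_map, List.length_range]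
    refine Finset.sum_congr rfl (fun i hi => ?_)
    rw [windInd_map_range, colHitA, B2N_decide]
  rw [Finset.sum_congr rfl (fun j _ => h j), Finset.sum_comm]

lemma dscL_eq (dna : List String) (t : Nat) :
    dscL dna t = (List.range (min (dna.length - 1 + pvM dna - t) dna.length - (dna.length - 1 - t))).map
      (fun p => pvG dna (dna.length - 1 - t + p) (dna.length - 1 - t + p + t - (dna.length - 1))) := by
  rw [dscL]
  refine filterMap_range_if dna.length (dna.length - 1 - t) (min (dna.length - 1 + pvM dna - t) dna.length)
    (fun i => pvG dna i (i + t - (dna.length - 1))) _ ?_ (by omega) (by omega)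
  intro i hi
  by_cases hc : dna.length - 1 - t ≤ i ∧ i < min (dna.length - 1 + pvM dna - t) dna.length
  · rw [if_pos (by omega), if_pos hc,
      show ((i : Int) + ((t : Int) - ((dna.length : Int) - 1))).toNat = i + t - (dna.length - 1) by omega]
  · rw [if_neg (by omega), if_neg hc]

lemma desc_part (dna : List String) :
    ∑ t ∈ Finset.range (dna.length - 1 + pvM dna), wc (dscL dna t)
      = ∑ i ∈ Finset.range dna.length, ∑ j ∈ Finset.range (pvM dna), B2N (dgHitA dna i j) := by
  have hwc : ∀ t ∈ Finset.range (dna.length - 1 + pvM dna), wc (dscL dna t)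
      = ∑ p ∈ Finset.range (min (dna.length - 1 + pvM dna - t) dna.length - (dna.length - 1 - t)),
          windInd ((List.range (min (dna.length - 1 + pvM dna - t) dna.length - (dna.length - 1 - t))).map
            (fun p => pvG dna (dna.length - 1 - t + p) (dna.length - 1 - t + p + t - (dna.length - 1)))) p := by
    intro t _
    rw [dscL_eq dna t, wc_eq_sum, List.length_map, List.length_range]
  rw [Finset.sum_congr rfl hwc]
  have hwi : ∀ t p : Nat,
      windInd ((List.range (min (dna.length - 1 + pvM dna - t) dna.length - (dna.length - 1 - t))).map
        (fun p => pvG dna (dna.length - 1 - t + p) (dna.length - 1 - t + p + t - (dna.length - 1)))) p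
      = if p + 3 < min (dna.length - 1 + pvM dna - t) dna.length - (dna.length - 1 - t)
            ∧ pvG dna (dna.length - 1 - t + p) (dna.length - 1 - t + p + t - (dna.length - 1))
              = pvG dna (dna.length - 1 - t + (p+1)) (dna.length - 1 - t + (p+1) + t - (dna.length - 1))
            ∧ pvG dna (dna.length - 1 - t + (p+1)) (dna.length - 1 - t + (p+1) + t - (dna.length - 1))
              = pvG dna (dna.length - 1 - t + (p+2)) (dna.length - 1 - t + (p+2) + t - (dna.length - 1))
            ∧ pvG dna (dna.length - 1 - t + (p+2)) (dna.length - 1 - t + (p+2) + t - (dna.length - 1))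
              = pvG dna (dna.length - 1 - t + (p+3)) (dna.length - 1 - t + (p+3) + t - (dna.length - 1))
        then 1 else 0 := by
    intro t p
    exact windInd_map_range _ _ p
  rw [Finset.sum_congr rfl (fun t _ => Finset.sum_congr rfl (fun p _ => hwi t p))]
  refine sum_bij2 _ _ _ _ _ _
    (fun t p => dna.length - 1 - t + p)
    (fun t p => dna.length - 1 - t + p + t - (dna.length - 1))
    (fun i j => dna.length - 1 + j - i)
    (fun i j => i - (dna.length - 1 - (dna.length - 1 + j - i))) ?_ ?_
  · intro t p ht hp
    dsimp only at *
    refine ⟨by omega, by omega, by omega, by omega, ?_⟩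
    rw [dgHitA, B2N_decide,
      show dna.length - 1 - t + (p+1) + t - (dna.length - 1) = dna.length - 1 - t + p + t - (dna.length - 1) + 1 by omega,
      show dna.length - 1 - t + (p+2) + t - (dna.length - 1) = dna.length - 1 - t + p + t - (dna.length - 1) + 2 by omega,
      show dna.length - 1 - t + (p+3) + t - (dna.length - 1) = dna.length - 1 - t + p + t - (dna.length - 1) + 3 by omega,
      show dna.length - 1 - t + (p+1) = dna.length - 1 - t + p + 1 by omega,
      show dna.length - 1 - t + (p+2) = dna.length - 1 - t + p + 2 by omega,
      show dna.length - 1 - t + (p+3) = dna.length - 1 - t + p + 3 by omega]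
    refine if_congr ?_ rfl rfl
    constructor
    · rintro ⟨h, c⟩; exact ⟨by omega, by omega, c⟩
    · rintro ⟨h1, h2, c⟩; exact ⟨by omega, c⟩
  · intro i j hi hj
    dsimp only at *
    refine ⟨by omega, by omega, by omega, by omega⟩

def Ucell (dna : List String) (i j : Nat) : Nat :=
  if i + 3 < dna.length ∧ 3 ≤ j ∧ pvG dna i j = pvG dna (i+1) (j-1) ∧ pvG dna (i+1) (j-1) = pvG dna (i+2) (j-2)
      ∧ pvG dna (i+2) (j-2) = pvG dna (i+3) (j-3) then 1 else 0

lemma ascL_eq (dna : List String) (s : Nat) (hs : s < dna.length + pvM dna - 1) :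
    ascL dna s = (List.range (min (s + 1) dna.length - (s + 1 - pvM dna))).map
      (fun p => pvG dna (s + 1 - pvM dna + p) (s - (s + 1 - pvM dna + p))) := by
  rw [ascL]
  refine filterMap_range_if dna.length (s + 1 - pvM dna) (min (s + 1) dna.length)
    (fun i => pvG dna i (s - i)) _ ?_ (by omega) (by omega)
  intro i hi
  by_cases hc : s + 1 - pvM dna ≤ i ∧ i < min (s + 1) dna.length
  · rw [if_pos (by omega), if_pos hc, show ((s : Int) - (i : Int)).toNat = s - i by omega]
  · rw [if_neg (by omega), if_neg hc]

lemma asc_part (dna : List String) :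
    ∑ s ∈ Finset.range (dna.length + pvM dna - 1), wc (ascL dna s)
      = ∑ i ∈ Finset.range dna.length, ∑ j ∈ Finset.range (pvM dna), Ucell dna i j := by
  have hwc : ∀ s ∈ Finset.range (dna.length + pvM dna - 1), wc (ascL dna s)
      = ∑ p ∈ Finset.range (min (s + 1) dna.length - (s + 1 - pvM dna)),
          windInd ((List.range (min (s + 1) dna.length - (s + 1 - pvM dna))).map
            (fun p => pvG dna (s + 1 - pvM dna + p) (s - (s + 1 - pvM dna + p)))) p := by
    intro s hs
    rw [Finset.mem_range] at hs
    rw [ascL_eq dna s hs, wc_eq_sum, List.length_map, List.length_range]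
  rw [Finset.sum_congr rfl hwc]
  rw [Finset.sum_congr rfl (fun s _ => Finset.sum_congr rfl (fun p _ => windInd_map_range _ _ p))]
  refine sum_bij2 _ _ _ _ _ _
    (fun s p => s + 1 - pvM dna + p)
    (fun s p => s - (s + 1 - pvM dna + p))
    (fun i j => i + j)
    (fun i j => i - (i + j + 1 - pvM dna)) ?_ ?_
  · intro s p hs hp
    dsimp only at *
    refine ⟨by omega, by omega, by omega, by omega, ?_⟩
    rw [Ucell,
      show s + 1 - pvM dna + (p+1) = s + 1 - pvM dna + p + 1 by omega,
      show s + 1 - pvM dna + (p+2) = s + 1 - pvM dna + p + 2 by omega,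
      show s + 1 - pvM dna + (p+3) = s + 1 - pvM dna + p + 3 by omega,
      show s - (s + 1 - pvM dna + p + 1) = s - (s + 1 - pvM dna + p) - 1 by omega,
      show s - (s + 1 - pvM dna + p + 2) = s - (s + 1 - pvM dna + p) - 2 by omega,
      show s - (s + 1 - pvM dna + p + 3) = s - (s + 1 - pvM dna + p) - 3 by omega]
    refine if_congr ?_ rfl rfl
    constructor
    · rintro ⟨h, c⟩; exact ⟨by omega, by omega, c⟩
    · rintro ⟨h1, h2, c⟩; exact ⟨by omega, c⟩
  · intro i j hi hj
    dsimp only at *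
    refine ⟨by omega, by omega, by omega, by omega⟩

lemma up_part (dna : List String) :
    ∑ i ∈ Finset.range dna.length, ∑ j ∈ Finset.range (pvM dna), B2N (upHitA dna i j)
      = ∑ i ∈ Finset.range dna.length, ∑ j ∈ Finset.range (pvM dna), Ucell dna i j := by
  rw [← Finset.sum_product' (s := Finset.range dna.length) (t := Finset.range (pvM dna))
        (f := fun i j => B2N (upHitA dna i j)),
      ← Finset.sum_product' (s := Finset.range dna.length) (t := Finset.range (pvM dna))
        (f := fun i j => Ucell dna i j)]
  have hA : ∀ x ∈ Finset.range dna.length ×ˢ Finset.range (pvM dna),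
      B2N (upHitA dna x.1 x.2) ≠ 0 → 3 ≤ x.1 ∧ x.2 + 3 < pvM dna := by
    rintro ⟨I, J⟩ _ hne
    rw [upHitA, B2N_decide] at hne
    by_contra hc
    exact hne (by rw [if_neg (by tauto)])
  have hB : ∀ x ∈ Finset.range dna.length ×ˢ Finset.range (pvM dna),
      Ucell dna x.1 x.2 ≠ 0 → x.1 + 3 < dna.length ∧ 3 ≤ x.2 := by
    rintro ⟨i, j⟩ _ hne
    rw [Ucell] at hne
    by_contra hc
    exact hne (by rw [if_neg (by tauto)])
  conv_lhs => rw [← Finset.sum_filter_of_ne hA]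
  conv_rhs => rw [← Finset.sum_filter_of_ne hB]
  refine Finset.sum_nbij' (fun x => (x.1 - 3, x.2 + 3)) (fun x => (x.1 + 3, x.2 - 3)) ?_ ?_ ?_ ?_ ?_
  · rintro ⟨I, J⟩ hx
    simp only [Finset.mem_filter, Finset.mem_product, Finset.mem_range] at *
    omega
  · rintro ⟨i, j⟩ hx
    simp only [Finset.mem_filter, Finset.mem_product, Finset.mem_range] at *
    omega
  · rintro ⟨I, J⟩ hx
    simp only [Finset.mem_filter, Finset.mem_product, Finset.mem_range] at hx
    show (I - 3 + 3, J + 3 - 3) = (I, J)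
    rw [show I - 3 + 3 = I by omega, show J + 3 - 3 = J by omega]
  · rintro ⟨i, j⟩ hx
    simp only [Finset.mem_filter, Finset.mem_product, Finset.mem_range] at hx
    show (i + 3 - 3, j - 3 + 3) = (i, j)
    rw [show i + 3 - 3 = i by omega, show j - 3 + 3 = j by omega]
  · rintro ⟨I, J⟩ hx
    simp only [Finset.mem_filter, Finset.mem_product, Finset.mem_range] at hx
    dsimp only
    rw [upHitA, B2N_decide, Ucell,
      show I - 3 + 3 = I by omega, show I - 3 + 1 = I - 2 by omega, show I - 3 + 2 = I - 1 by omega,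
      show J + 3 - 1 = J + 2 by omega, show J + 3 - 2 = J + 1 by omega, show J + 3 - 3 = J by omega]
    refine if_congr ?_ rfl rfl
    constructor
    · rintro ⟨h1, h2, c1, c2, c3⟩; exact ⟨by omega, by omega, c3.symm, c2.symm, c1.symm⟩
    · rintro ⟨h1, h2, c1, c2, c3⟩; exact ⟨by omega, by omega, c3.symm, c2.symm, c1.symm⟩

lemma countB_eq_countA (dna : List String) :
    ((linesB dna).map wc).sum = countA dna := by
  rw [countB_eq, rows_part dna, cols_part, desc_part, asc_part, ← up_part]
  unfold countA cellA
  simp only [Finset.sum_add_distrib]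

-- ===== VERDICT (by name: the statement is the Claim_ definition above) =====
theorem is_mutant_spec : Claim_equal_is_mutant := by
  intro dna _ _
  unfold Spec_is_mutant
  rw [is_mutant_eq, is_mutant_alt, foldl_scan, zero_add, countB_eq_countA dna]
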